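-- pv_equiv track=rewrite | github.com/Baguette-bbang/coding-test | BaekJoon/7000/7490.py | format_exp
-- ===== SOURCE A (Python) =====
-- def format_exp(exp):
--     formatted_exp = ''
--     in_number = False
--     for char in exp:
--         if char.isdigit():
--             if in_number:  # 연속된 숫자의 경우
--                 formatted_exp += ' ' + char
--
--             else:  # 새 숫자의 시작인 경우
--                 formatted_exp += char
--                 in_number = True
--         else:
--             formatted_exp += char
--             in_number = False
--     return formatted_exp
-- ===== SOURCE B (Python) =====
-- def format_exp(exp):
--     # run-based segmentation: repeatedly locate the maximal run of digits,
--     # join that run with ' ', copy other characters one at a time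
--     parts = []
--     i, n = 0, len(exp)
--     while i < n:
--         if exp[i].isdigit():
--             j = i
--             while j < n and exp[j].isdigit():
--                 j += 1
--             parts.append(' '.join(exp[i:j]))
--             i = j
--         else:
--             parts.append(exp[i])
--             i += 1
--     return ''.join(parts)
-- ===== Notes on version B (the rewrite author's own statement) =====
-- stated objective: alternative
-- what changed: Replaces the character-by-character loop with an in_number flag by run-based segmentation: an outer loop finds each maximal digit run, space-joins it, and copies non-digit characters verbatim.
import Mathlib
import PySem

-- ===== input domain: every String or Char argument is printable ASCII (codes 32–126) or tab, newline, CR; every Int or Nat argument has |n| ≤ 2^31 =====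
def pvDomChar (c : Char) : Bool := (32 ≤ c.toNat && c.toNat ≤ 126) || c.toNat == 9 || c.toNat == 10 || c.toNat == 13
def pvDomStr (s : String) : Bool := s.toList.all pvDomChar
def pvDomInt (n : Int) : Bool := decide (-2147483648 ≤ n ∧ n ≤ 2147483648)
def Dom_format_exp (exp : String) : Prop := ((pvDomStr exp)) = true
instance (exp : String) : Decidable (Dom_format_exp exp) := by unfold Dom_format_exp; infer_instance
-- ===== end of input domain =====

-- B replaces A's per-character in_number-flag loop by run-based segmentation
-- (find each maximal digit run and space-join it); alternative decomposition, same cost.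

-- ===== PORT A =====
-- A's for-loop: state = (accumulated chars, in_number flag)
def formatExpLoop : List Char → List Char → Bool → List Char
  | [], acc, _ => acc
  | c :: rest, acc, inNum =>
      if PySem.Chars.isdigit c then
        if inNum then
          formatExpLoop rest (acc ++ [' ', c]) true
        else
          formatExpLoop rest (acc ++ [c]) true
      else
        formatExpLoop rest (acc ++ [c]) false

def format_exp (exp : String) : String :=
  String.mk (formatExpLoop exp.toList [] false)

-- ===== PORT B =====
-- B's outer while-loop over runs: at a digit, take the maximal digit run
-- (the inner scan = takeWhile/dropWhile) and space-join it
-- (= List.intersperse on single characters); otherwise copy one char.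
def altRuns : List Char → List Char
  | [] => []
  | c :: rest =>
      if PySem.Chars.isdigit c then
        List.intersperse ' ' (c :: rest.takeWhile PySem.Chars.isdigit)
          ++ altRuns (rest.dropWhile PySem.Chars.isdigit)
      else
        c :: altRuns rest
termination_by l => l.length
decreasing_by
  · simpa using Nat.lt_succ_of_le (List.length_dropWhile_le _ _)
  · simp

def format_exp_alt (exp : String) : String :=
  String.mk (altRuns exp.toList)

-- ===== PRECONDITION & SPEC =====
def Spec_format_exp (exp : String) (out : String) : Prop := out = format_exp_alt exp
instance (exp : String) (out : String) : Decidable (Spec_format_exp exp out) := by unfold Spec_format_exp; infer_instance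

-- ===== CLAIM (what is proved, stated in full; the proofs are below) =====
def Claim_equal_format_exp : Prop := ∀ (exp : String), Dom_format_exp exp → Spec_format_exp exp (format_exp exp)

-- ===== LEMMAS AND PROOFS =====

-- flag-indexed specification of A's loop output
def specF : Bool → List Char → List Char
  | _, [] => []
  | b, c :: rest =>
      if PySem.Chars.isdigit c then
        (if b then [' ', c] else [c]) ++ specF true rest
      else
        c :: specF false rest

theorem loop_eq_specF (cs : List Char) :
    ∀ (acc : List Char) (b : Bool), formatExpLoop cs acc b = acc ++ specF b cs := by
  induction cs with
  | nil => intro acc b; simp [formatExpLoop, specF]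
  | cons c rest ih =>
      intro acc b
      by_cases hc : PySem.Chars.isdigit c
      · cases b <;> simp [formatExpLoop, specF, hc, ih]
      · simp [formatExpLoop, specF, hc, ih]

theorem intersperse_cons (c : Char) (xs : List Char) :
    List.intersperse ' ' (c :: xs) = c :: xs.flatMap (fun x => [' ', x]) := by
  induction xs generalizing c with
  | nil => simp [List.intersperse]
  | cons y ys ih => simp [List.intersperse, ih y]

theorem specF_true_run (rest : List Char) :
    specF true rest =
      (rest.takeWhile PySem.Chars.isdigit).flatMap (fun x => [' ', x])
        ++ specF false (rest.dropWhile PySem.Chars.isdigit) := by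
  induction rest with
  | nil => simp [specF]
  | cons c r ih =>
      by_cases hc : PySem.Chars.isdigit c
      · simp [specF, hc, ih]
      · simp [specF, hc]

theorem altRuns_eq_specF (cs : List Char) : altRuns cs = specF false cs := by
  induction cs using altRuns.induct with
  | case1 => simp [altRuns, specF]
  | case2 c rest hc ih =>
      rw [altRuns, if_pos hc, specF, if_pos hc, ih, intersperse_cons, specF_true_run]
      simp
  | case3 c rest hc ih =>
      rw [altRuns, if_neg hc, specF, if_neg hc, ih]

-- ===== VERDICT (by name: the statement is the Claim_ definition above) =====
theorem format_exp_spec : Claim_equal_format_exp := by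
  intro exp _
  unfold Spec_format_exp format_exp format_exp_alt
  rw [loop_eq_specF, altRuns_eq_specF]
  simp
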